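-- pv_equiv track=rewrite | github.com/altermarkive/training | algorithms/code/hackerrank/defaultdict_tutorial/test_defaultdict_tutorial.py | list_repetitions
-- ===== SOURCE A (Python) =====
-- import collections
--
-- def list_repetitions(
--     words_a: list[str], words_b: list[str]
-- ) -> dict[str, list[int]]:
--     result = collections.defaultdict(list)
--     for i, word in enumerate(words_a):
--         if word in words_b:
--             result[word].append(i + 1)
--     return result
-- ===== SOURCE B (Python) =====
-- import collections
--
-- def list_repetitions(
--     words_a: list[str], words_b: list[str]
-- ) -> dict[str, list[int]]:
--     # Index every word of words_a once, then filter by a set of words_b.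
--     positions = collections.defaultdict(list)
--     for i, word in enumerate(words_a):
--         positions[word].append(i + 1)
--     present = set(words_b)
--     result = collections.defaultdict(list)
--     for word, idxs in positions.items():
--         if word in present:
--             result[word] = list(idxs)
--     return result
-- ===== Notes on version B (the rewrite author's own statement) =====
-- stated objective: alternative
-- what changed: B first builds a full word->indices index over words_a in one pass, then filters that index by set(words_b) in a second pass, instead of testing 'word in words_b' by a linear scan inside the indexing loop.
import Mathlib
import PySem

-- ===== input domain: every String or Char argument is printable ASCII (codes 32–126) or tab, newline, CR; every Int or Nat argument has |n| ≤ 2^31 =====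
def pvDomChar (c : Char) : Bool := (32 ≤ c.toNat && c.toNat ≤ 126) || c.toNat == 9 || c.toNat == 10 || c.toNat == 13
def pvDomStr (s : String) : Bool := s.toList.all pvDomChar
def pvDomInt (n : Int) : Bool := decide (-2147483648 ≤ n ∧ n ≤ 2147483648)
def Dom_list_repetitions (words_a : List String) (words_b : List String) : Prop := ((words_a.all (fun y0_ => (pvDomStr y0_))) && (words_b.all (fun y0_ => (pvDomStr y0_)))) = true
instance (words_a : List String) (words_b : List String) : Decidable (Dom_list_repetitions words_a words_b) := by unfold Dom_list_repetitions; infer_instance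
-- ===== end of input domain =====

-- B replaces A's per-word linear scan of words_b by a one-pass full index of words_a
-- filtered afterwards through set(words_b): a different two-pass decomposition, asymptotically faster.

-- ===== PORT A =====
-- one loop over enumerate(words_a); 'word in words_b' inside the loop; defaultdict append
def list_repetitions (words_a : List String) (words_b : List String) : List (String × List Int) :=
  ((PySem.List.enumerate words_a 0).foldl
      (fun result p =>
        if words_b.contains p.2 then result.modify p.2 ([] : List Int) (· ++ [p.1 + 1])
        else result)
      PySem.Dict.empty).items

-- ===== PORT B =====
-- pass 1: full index of words_a; then present = set(words_b); pass 2: filter the index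
def list_repetitions_alt (words_a : List String) (words_b : List String) : List (String × List Int) :=
  let positions := (PySem.List.enumerate words_a 0).foldl
      (fun d p => d.modify p.2 ([] : List Int) (· ++ [p.1 + 1])) PySem.Dict.empty
  let present : PySem.Set String := PySem.Set.ofList words_b
  let result := positions.items.foldl
      (fun d q => if PySem.Set.contains present q.1 then d.insert q.1 q.2 else d)
      PySem.Dict.empty
  result.items

-- ===== PRECONDITION & SPEC =====
def Spec_list_repetitions (words_a : List String) (words_b : List String) (out : List (String × List Int)) : Prop := out = list_repetitions_alt words_a words_b
instance (words_a : List String) (words_b : List String) (out : List (String × List Int)) : Decidable (Spec_list_repetitions words_a words_b out) := by unfold Spec_list_repetitions; infer_instance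

-- ===== CLAIM (what is proved, stated in full; the proofs are below) =====
def Claim_equal_list_repetitions : Prop := ∀ (words_a : List String) (words_b : List String), Dom_list_repetitions words_a words_b → Spec_list_repetitions words_a words_b (list_repetitions words_a words_b)

-- ===== LEMMAS AND PROOFS =====

-- dedup (Set.ofList) commutes with filter
theorem setOfList_filter (xs : List String) (c : String → Bool) :
    PySem.Set.ofList (xs.filter c) = (PySem.Set.ofList xs).filter c := by
  induction xs with
  | nil => rfl
  | cons x xs ih =>
    rw [PySem.Set.ofList_cons, List.filter_cons]
    by_cases hx : c x = true
    · rw [if_pos hx, PySem.Set.ofList_cons, ih, List.filter_cons, if_pos hx]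
      simp only [PySem.Set.discard, List.filter_filter]
      exact congrArg _ (List.filter_congr (fun y _ => by rw [Bool.and_comm]))
    · rw [if_neg hx, ih, List.filter_cons, if_neg hx]
      simp only [PySem.Set.discard, List.filter_filter]
      refine List.filter_congr (fun y _ => ?_)
      by_cases hyx : y = x
      · subst hyx; simp [hx]
      · simp [hyx]
  
-- the grouping fold, characterised: keys are the distinct words in order, values the grouped seconds
theorem grp_items (N : List (String × Int)) :
    ((N.foldl (fun d p => d.modify p.1 ([] : List Int) (· ++ [p.2])) PySem.Dict.empty).items)
      = (PySem.Set.ofList (N.map (·.1))).map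
          (fun k => (k, (N.filter (fun p => p.1 == k)).map (·.2))) := by
  have hnd : ((N.foldl (fun d p => d.modify p.1 ([] : List Int) (· ++ [p.2])) PySem.Dict.empty)).keys.Nodup :=
    PySem.Dict.nodup_keys_foldl_modify_key N (·.1) [] (fun _ p => (· ++ [p.2])) PySem.Dict.empty (by simp [PySem.Dict.keys_empty])
  rw [PySem.Dict.items_eq_map_keys _ hnd ([] : List Int),
      PySem.Dict.keys_foldl_modify_key N (·.1) [] (fun _ p => (· ++ [p.2]))]
  simp only [PySem.Dict.keys_empty, PySem.Set.update_nil_left,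
    PySem.Dict.getD_foldl_modify_append, PySem.Dict.getD_empty, List.nil_append]


theorem list_repetitions_A_char (wa wb : List String) :
    list_repetitions wa wb
      = ((PySem.Set.ofList wa).filter (fun k => wb.contains k)).map
          (fun k => (k, ((PySem.List.enumerate wa 0).filter (fun p => p.2 == k)).map (·.1 + 1))) := by
  unfold list_repetitions
  have h1 : (PySem.List.enumerate wa 0).foldl
      (fun result p => if wb.contains p.2 then result.modify p.2 ([] : List Int) (· ++ [p.1 + 1]) else result)
      PySem.Dict.empty
      = (((PySem.List.enumerate wa 0).map (fun p => (p.2, p.1 + 1))).filter (fun q => wb.contains q.1)).foldl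
          (fun d q => d.modify q.1 ([] : List Int) (· ++ [q.2])) PySem.Dict.empty := by
    rw [List.foldl_filter, List.foldl_map]
  rw [h1, grp_items]
  simp only [List.filter_filter, List.filter_map, List.map_map]
  rw [show ((fun x : String × Int => x.1) ∘ fun p : Int × String => (p.2, p.1 + 1)) = (fun p : Int × String => p.2) from rfl,
      show ((fun q : String × Int => wb.contains q.1) ∘ fun p : Int × String => (p.2, p.1 + 1)) = ((fun k => wb.contains k) ∘ (fun p : Int × String => p.2)) from rfl,
      ← List.filter_map, PySem.List.map_snd_enumerate, setOfList_filter]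
  refine List.map_congr_left (fun k hk => ?_)
  have hc : wb.contains k = true := (List.mem_filter.mp hk).2
  refine congrArg (fun v => (k, v)) ?_
  rw [show ((fun x : String × Int => x.2) ∘ fun p : Int × String => (p.2, p.1 + 1)) = (fun p : Int × String => p.1 + 1) from rfl]
  refine congrArg _ (List.filter_congr (fun a _ => ?_))
  by_cases h : a.2 = k
  · subst h; simpa using hc
  · simp [h]


theorem list_repetitions_B_char (wa wb : List String) :
    list_repetitions_alt wa wb
      = ((PySem.Set.ofList wa).filter (fun k => wb.contains k)).map
          (fun k => (k, ((PySem.List.enumerate wa 0).filter (fun p => p.2 == k)).map (·.1 + 1))) := by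
  unfold list_repetitions_alt
  dsimp only
  have hpos : (PySem.List.enumerate wa 0).foldl
      (fun d p => d.modify p.2 ([] : List Int) (· ++ [p.1 + 1])) PySem.Dict.empty
      = ((PySem.List.enumerate wa 0).map (fun p => (p.2, p.1 + 1))).foldl
          (fun d q => d.modify q.1 ([] : List Int) (· ++ [q.2])) PySem.Dict.empty := by
    rw [List.foldl_map]
  rw [hpos, grp_items]
  rw [List.map_map,
      show ((fun x : String × Int => x.1) ∘ fun p : Int × String => (p.2, p.1 + 1)) = (fun p : Int × String => p.2) from rfl,
      PySem.List.map_snd_enumerate]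
  rw [← List.foldl_filter, List.filter_map,
      show ((fun q : String × List Int => (PySem.Set.ofList wb).contains q.1) ∘
            (fun k => (k, List.map (fun x : String × Int => x.2)
              (List.filter (fun p : String × Int => p.1 == k)
                (List.map (fun p : Int × String => (p.2, p.1 + 1)) (PySem.List.enumerate wa))))))
          = (fun k => (PySem.Set.ofList wb).contains k) from rfl]
  have hnodup : ((List.map (fun k => (k, List.map (fun x : String × Int => x.2)
        (List.filter (fun p : String × Int => p.1 == k)
          (List.map (fun p : Int × String => (p.2, p.1 + 1)) (PySem.List.enumerate wa)))))
        ((PySem.Set.ofList wa).filter (fun k => (PySem.Set.ofList wb).contains k))).map (fun q => q.1)).Nodup := by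
    rw [List.map_map,
        show ((fun q : String × List Int => q.1) ∘ (fun k => (k, List.map (fun x : String × Int => x.2)
          (List.filter (fun p : String × Int => p.1 == k)
            (List.map (fun p : Int × String => (p.2, p.1 + 1)) (PySem.List.enumerate wa))))))
          = (fun k : String => k) from rfl,
        List.map_id']
    exact List.Nodup.filter _ (PySem.Set.nodup_ofList wa)
  have hins := PySem.Dict.items_foldl_insert_fresh
      (List.map (fun k => (k, List.map (fun x : String × Int => x.2)
        (List.filter (fun p : String × Int => p.1 == k)
          (List.map (fun p : Int × String => (p.2, p.1 + 1)) (PySem.List.enumerate wa)))))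
        ((PySem.Set.ofList wa).filter (fun k => (PySem.Set.ofList wb).contains k)))
      (fun q => q.1) (fun q => q.2) PySem.Dict.empty
      (fun a _ => PySem.Dict.contains_empty _) hnodup
  rw [hins, List.map_map,
      show ((fun a : String × List Int => (a.1, a.2)) ∘ (fun k => (k, List.map (fun x : String × Int => x.2)
        (List.filter (fun p : String × Int => p.1 == k)
          (List.map (fun p : Int × String => (p.2, p.1 + 1)) (PySem.List.enumerate wa))))))
        = (fun k => (k, List.map (fun x : String × Int => x.2)
            (List.filter (fun p : String × Int => p.1 == k)
              (List.map (fun p : Int × String => (p.2, p.1 + 1)) (PySem.List.enumerate wa))))) from rfl]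
  have hfil : (PySem.Set.ofList wa).filter (fun k => (PySem.Set.ofList wb).contains k)
      = (PySem.Set.ofList wa).filter (fun k => wb.contains k) :=
    List.filter_congr (fun k _ => by simp [PySem.Set.mem_ofList])
  rw [hfil]
  rw [show (PySem.Dict.empty : PySem.Dict String (List Int)).items = [] from rfl, List.nil_append]
  refine List.map_congr_left (fun k _ => ?_)
  refine congrArg (fun v => (k, v)) ?_
  rw [List.filter_map, List.map_map]
  rfl

-- ===== VERDICT (by name: the statement is the Claim_ definition above) =====
theorem list_repetitions_spec : Claim_equal_list_repetitions := by
  intro wa wb _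
  unfold Spec_list_repetitions
  rw [list_repetitions_A_char, list_repetitions_B_char]
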